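-- pv_equiv track=rewrite | github.com/eian-lee/coder_five | Eian/week4/카드게임.py | solution
-- ===== SOURCE A (Python) =====
-- def solution(left, right):
--     N = len(left)
--     dp = [[0] * (N+1) for _ in range(N+1)]
--
--
--     for i in range(N-1, -1, -1):
--         for j in range(N-1, -1, -1):
--             if left[i] > right[j]:
--                 dp[i][j] = dp[i][j+1] + right[j]
--             else:
--                 dp[i][j] = max(dp[i+1][j], dp[i+1][j+1])
--
--     return dp[0][0]
-- ===== SOURCE B (Python) =====
-- def solution(left, right):
--     # Closed-form row update: dp[i][j] = (sum of the maximal forced run of right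
--     # cards < left[i] starting at j) + best of the previous row at the run's end.
--     # S holds suffix sums of right[:N]; k sweeps the run-end pointer.
--     N = len(left)
--     S = [0] * (N + 1)
--     for j in range(N - 1, -1, -1):
--         S[j] = S[j + 1] + right[j]
--     prev = [0] * (N + 1)
--     for v in reversed(left):
--         cur = [0] * (N + 1)
--         k = N
--         for j in range(N - 1, -1, -1):
--             if right[j] >= v:
--                 k = j
--             if k == N:
--                 cur[j] = S[j]
--             else:
--                 cur[j] = S[j] - S[k] + max(prev[k], prev[k + 1])
--         prev = cur
--     return prev[0]
-- ===== Notes on version B (the rewrite author's own statement) =====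
-- stated objective: alternative
-- what changed: Replaces A's per-cell branch recurrence dp[i][j]=dp[i][j+1]+right[j] / max(...) by a closed-form row update: precomputed suffix sums of right and a sweeping run-end pointer k give each entry directly as (sum of the forced run starting at j) + max of the previous row at the run's end, so no entry of the row being built is ever read.
import Mathlib
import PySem

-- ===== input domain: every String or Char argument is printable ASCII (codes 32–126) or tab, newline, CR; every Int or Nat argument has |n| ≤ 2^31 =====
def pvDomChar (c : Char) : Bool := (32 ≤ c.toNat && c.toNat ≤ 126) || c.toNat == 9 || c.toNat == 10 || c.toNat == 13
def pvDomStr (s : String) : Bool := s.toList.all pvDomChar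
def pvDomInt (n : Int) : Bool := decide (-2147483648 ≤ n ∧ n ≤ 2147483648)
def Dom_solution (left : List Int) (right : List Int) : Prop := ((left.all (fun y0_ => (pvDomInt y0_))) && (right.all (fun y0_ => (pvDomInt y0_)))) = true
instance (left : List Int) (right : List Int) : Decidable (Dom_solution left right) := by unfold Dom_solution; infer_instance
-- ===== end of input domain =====

-- B replaces A's per-cell branch recurrence by a closed-form row update: suffix sums
-- of right plus a sweeping run-end pointer k give each entry of the new row directly,
-- without ever reading an entry of the row being built.

-- ===== PORT A =====
-- body of the inner loop: 'dp[i][j] = dp[i][j+1] + right[j]' / 'dp[i][j] = max(dp[i+1][j], dp[i+1][j+1])';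
-- all indices are in range under Pre_, so pyGetD/pySetD are exact here
def aBody (left right : List Int) (dp : List (List Int)) (i j : Int) : List (List Int) :=
  if PySem.List.pyGetD left i 0 > PySem.List.pyGetD right j 0 then
    PySem.List.pySetD dp i (PySem.List.pySetD (PySem.List.pyGetD dp i []) j
      (PySem.List.pyGetD (PySem.List.pyGetD dp i []) (j + 1) 0 + PySem.List.pyGetD right j 0))
  else
    PySem.List.pySetD dp i (PySem.List.pySetD (PySem.List.pyGetD dp i []) j
      (max (PySem.List.pyGetD (PySem.List.pyGetD dp (i + 1) []) j 0)
           (PySem.List.pyGetD (PySem.List.pyGetD dp (i + 1) []) (j + 1) 0)))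

def solution (left : List Int) (right : List Int) : Int :=
  let N : Int := (left.length : Int)
  -- dp = [[0] * (N+1) for _ in range(N+1)]
  let dp0 : List (List Int) :=
    (PySem.List.pyRange 0 (N + 1) 1).map (fun _ => List.replicate (left.length + 1) (0 : Int))
  let dp := (PySem.List.pyRange (N - 1) (-1) (-1)).foldl
    (fun dp i => (PySem.List.pyRange (N - 1) (-1) (-1)).foldl
      (fun dp j => aBody left right dp i j) dp) dp0
  PySem.List.pyGetD (PySem.List.pyGetD dp 0 []) 0 0

-- ===== PORT B =====
-- 'S[j] = S[j+1] + right[j]'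
def bSBody (right : List Int) (S : List Int) (j : Int) : List Int :=
  PySem.List.pySetD S j (PySem.List.pyGetD S (j + 1) 0 + PySem.List.pyGetD right j 0)

-- the S-building loop of Source B
def bS (left right : List Int) : List Int :=
  (PySem.List.pyRange ((left.length : Int) - 1) (-1) (-1)).foldl (bSBody right)
    (List.replicate (left.length + 1) (0 : Int))

-- body of Source B's inner loop: update the run-end pointer k, then write the closed-form entry
def bRowBody (right S prev : List Int) (N v : Int) (st : Int × List Int) (j : Int) :
    Int × List Int :=
  let k := if PySem.List.pyGetD right j 0 ≥ v then j else st.1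
  let cur :=
    if k = N then
      PySem.List.pySetD st.2 j (PySem.List.pyGetD S j 0)
    else
      PySem.List.pySetD st.2 j
        (PySem.List.pyGetD S j 0 - PySem.List.pyGetD S k 0 +
          max (PySem.List.pyGetD prev k 0) (PySem.List.pyGetD prev (k + 1) 0))
  (k, cur)

-- one iteration of Source B's outer loop: build the new row cur from prev
def bRow (right S prev : List Int) (n : Nat) (v : Int) : List Int :=
  ((PySem.List.pyRange ((n : Int) - 1) (-1) (-1)).foldl (bRowBody right S prev (n : Int) v)
    ((n : Int), List.replicate (n + 1) (0 : Int))).2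

def solution_alt (left : List Int) (right : List Int) : Int :=
  let S := bS left right
  let prev := left.reverse.foldl (fun prev v => bRow right S prev left.length v)
    (List.replicate (left.length + 1) (0 : Int))
  PySem.List.pyGetD prev 0 0

-- ===== PRECONDITION & SPEC =====
-- Pre_ excludes exactly the inputs where A raises IndexError: right shorter than left
-- (the loops read right[j] for every j < len(left)).
def Pre_solution (left : List Int) (right : List Int) : Prop := left.length ≤ right.length
instance (left : List Int) (right : List Int) : Decidable (Pre_solution left right) := by
  unfold Pre_solution; infer_instance

def pvWitness_solution : List Int × List Int := ([2, 1], [1, 3])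

def Spec_solution (left : List Int) (right : List Int) (out : Int) : Prop := out = solution_alt left right
instance (left : List Int) (right : List Int) (out : Int) : Decidable (Spec_solution left right out) := by
  unfold Spec_solution; infer_instance

-- ===== CLAIM (what is proved, stated in full; the proofs are below) =====
def Claim_equal_solution : Prop := ∀ (left : List Int) (right : List Int), Dom_solution left right → Pre_solution left right → Spec_solution left right (solution left right)

-- ===== LEMMAS AND PROOFS =====

-- the functional row recurrence characterizing A's table (entry j uses prev[j], prev[j+1],
-- and entry j+1 of the row being built; trailing entry 0)
def rstep (a : Int) : List Int → List Int → List Int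
  | _, [] => [(0 : Int)]
  | prev, b :: bs =>
    let rest := rstep a prev.tail bs
    (if a > b then rest.getD 0 0 + b else max (prev.getD 0 0) (prev.tail.getD 0 0)) :: rest

-- row i of the table, as a function of the left-suffix left.drop i
def rowsOf (right : List Int) (N : Nat) : List Int → List Int
  | [] => List.replicate (N + 1) 0
  | a :: rest => rstep a (rowsOf right N rest) (right.take N)

theorem getD_drop {α : Type} (xs : List α) (m n : Nat) (d : α) :
    (xs.drop m).getD n d = xs.getD (m + n) d := by
  induction m generalizing xs with
  | zero => simp
  | succ k ih =>
    cases xs with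
    | nil => simp
    | cons x xs => simp [Nat.succ_add]

theorem getD_tail {α : Type} (xs : List α) (n : Nat) (d : α) :
    xs.tail.getD n d = xs.getD (n + 1) d := by
  have h := getD_drop xs 1 n d
  simp only [List.drop_one] at h
  rw [h, Nat.add_comm]

theorem rstep_length (a : Int) (prev bs : List Int) :
    (rstep a prev bs).length = bs.length + 1 := by
  induction bs generalizing prev with
  | nil => simp [rstep]
  | cons b bs ih => simp [rstep, ih]

theorem rstep_drop_length (a : Int) (prev bs : List Int) :
    (rstep a prev bs).drop bs.length = [0] := by
  induction bs generalizing prev with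
  | nil => simp [rstep]
  | cons b bs ih => simpa [rstep] using ih prev.tail

theorem rstep_getD (a : Int) (prev bs : List Int) (m : Nat) (hm : m < bs.length) :
    (rstep a prev bs).getD m 0 =
      if a > bs.getD m 0 then (rstep a prev bs).getD (m + 1) 0 + bs.getD m 0
      else max (prev.getD m 0) (prev.getD (m + 1) 0) := by
  induction bs generalizing prev m with
  | nil => simp at hm
  | cons b bs ih =>
    cases m with
    | zero => simp [rstep]
    | succ k =>
      have hk : k < bs.length := by simpa using hm
      have := ih prev.tail k hk
      simpa [rstep, getD_tail] using this

theorem drop_eq_getD_cons {α : Type} (xs : List α) (m : Nat) (d : α) (h : m < xs.length) :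
    xs.drop m = xs.getD m d :: xs.drop (m + 1) := by
  rw [List.getD_eq_getElem xs d h]
  exact (List.getElem_cons_drop h).symm

theorem getD_set_ne {α : Type} (xs : List α) (i k : Nat) (v d : α) (h : k ≠ i) :
    (xs.set i v).getD k d = xs.getD k d := by
  simp [List.getD_eq_getElem?_getD, List.getElem?_set_ne (Ne.symm h)]

theorem set_append_cons {α : Type} (l : List α) (x v : α) (r : List α) :
    (l ++ x :: r).set l.length v = l ++ v :: r := by
  induction l with
  | nil => simp
  | cons y l ih => simp [ih]

theorem set_replicate_drop (T : List Int) (m : Nat) (h : m < T.length) :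
    (List.replicate (m + 1) (0 : Int) ++ T.drop (m + 1)).set m (T.getD m 0)
      = List.replicate m 0 ++ T.drop m := by
  rw [List.replicate_succ', List.append_assoc, List.singleton_append]
  have hs := set_append_cons (List.replicate m (0 : Int)) 0 (T.getD m 0) (T.drop (m + 1))
  rw [List.length_replicate] at hs
  rw [hs, ← drop_eq_getD_cons T m 0 h]

-- A's inner loop fills row i with rstep, leaving the other rows alone
theorem a_inner (left right : List Int) (N : Nat) (hNl : N = left.length)
    (hN : N ≤ right.length) (i : Nat) (hi : i < N) (prev : List Int) :
    ∀ m : Nat, m ≤ N → ∀ dp : List (List Int),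
      dp.length = N + 1 →
      dp.getD (i + 1) [] = prev →
      dp.getD i [] = List.replicate m 0 ++ (rstep (left.getD i 0) prev (right.take N)).drop m →
      let res := (PySem.List.pyRange ((m : Int) - 1) (-1) (-1)).foldl
        (fun dp j => aBody left right dp (i : Int) j) dp
      res.getD i [] = rstep (left.getD i 0) prev (right.take N) ∧
      (∀ k : Nat, k ≠ i → res.getD k [] = dp.getD k []) ∧ res.length = dp.length := by
  intro m
  induction m with
  | zero =>
    intro _ dp hlen hnext hrow
    rw [PySem.List.pyRange_neg_one_eq_nil (by norm_num)]
    simp only [List.foldl_nil]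
    refine ⟨?_, ?_, ?_⟩
    · simpa using hrow
    · intro k _; trivial
    · trivial
  | succ m ih =>
    intro hm dp hlen hnext hrow
    have hmN : m < N := hm
    have hmr : m < right.length := Nat.lt_of_lt_of_le hmN hN
    have hmrs : m < (right.take N).length := by simp [hmN, hmr]
    have hTlen : (rstep (left.getD i 0) prev (right.take N)).length = N + 1 := by
      rw [rstep_length]; simp [Nat.min_eq_left hN]
    have hcast : ((m + 1 : Nat) : Int) - 1 = (m : Int) := by push_cast; ring
    rw [hcast, PySem.List.pyRange_neg_one_cons (by omega), List.foldl_cons]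
    -- the value written into dp[i][m] is exactly entry m of the rstep row
    have hv : aBody left right dp (i : Int) (m : Int)
        = dp.set i ((dp.getD i []).set m ((rstep (left.getD i 0) prev (right.take N)).getD m 0)) := by
      rw [aBody, rstep_getD (left.getD i 0) prev (right.take N) m hmrs]
      have hrs : (right.take N).getD m 0 = right.getD m 0 := by
        rw [List.getD_eq_getElem _ _ hmrs, List.getD_eq_getElem _ _ hmr]; simp
      have hread1 : PySem.List.pyGetD (PySem.List.pyGetD dp (i : Int) []) ((m : Int) + 1) 0
          = (rstep (left.getD i 0) prev (right.take N)).getD (m + 1) 0 := by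
        rw [show ((m : Int) + 1) = ((m + 1 : Nat) : Int) by push_cast; ring]
        simp only [PySem.List.pyGetD_natCast, hrow]
        rw [List.getD_append_right (List.replicate (m + 1) (0 : Int)) _ _ (m + 1) (by simp)]
        simp
      have hprev : PySem.List.pyGetD dp ((i : Int) + 1) [] = prev := by
        rw [show ((i : Int) + 1) = ((i + 1 : Nat) : Int) by push_cast; ring]
        simp only [PySem.List.pyGetD_natCast, hnext]
      simp only [PySem.List.pyGetD_natCast, PySem.List.pySetD_natCast] at hread1 hprev ⊢
      rw [hread1, hprev, hrs]
      rw [show ((m : Int) + 1) = ((m + 1 : Nat) : Int) by push_cast; ring]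
      simp only [PySem.List.pyGetD_natCast]
      split_ifs <;> rfl
    rw [hv]
    have hdplen : i < dp.length := by omega
    have hset_i : (dp.set i ((dp.getD i []).set m ((rstep (left.getD i 0) prev (right.take N)).getD m 0))).getD i []
        = List.replicate m 0 ++ (rstep (left.getD i 0) prev (right.take N)).drop m := by
      rw [List.getD_eq_getElem?_getD, List.getElem?_set_self hdplen, Option.getD_some, hrow,
        set_replicate_drop _ _ (by omega)]
    have hres := ih (Nat.le_of_succ_le hm)
      (dp.set i ((dp.getD i []).set m ((rstep (left.getD i 0) prev (right.take N)).getD m 0)))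
      (by simpa using hlen)
      (by rw [getD_set_ne _ _ _ _ _ (by omega)]; exact hnext)
      hset_i
    refine ⟨hres.1, fun k hk => ?_, by simpa using hres.2.2⟩
    rw [hres.2.1 k hk, getD_set_ne _ _ _ _ _ hk]

-- A's outer loop: rows m..N of dp hold rowsOf of the corresponding left-suffixes
theorem a_outer (left right : List Int) (N : Nat) (hNl : N = left.length)
    (hN : N ≤ right.length) :
    ∀ m : Nat, m ≤ N → ∀ dp : List (List Int),
      dp.length = N + 1 →
      (∀ k : Nat, k < m → dp.getD k [] = List.replicate (N + 1) 0) →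
      (∀ k : Nat, m ≤ k → k ≤ N → dp.getD k [] = rowsOf right N (left.drop k)) →
      ((PySem.List.pyRange ((m : Int) - 1) (-1) (-1)).foldl
        (fun dp i => (PySem.List.pyRange ((N : Int) - 1) (-1) (-1)).foldl
          (fun dp j => aBody left right dp i j) dp) dp).getD 0 []
      = rowsOf right N left := by
  intro m
  induction m with
  | zero =>
    intro _ dp hlen h2 h3
    have h0 : PySem.List.pyRange (((0 : Nat) : Int) - 1) (-1) (-1) = [] :=
      PySem.List.pyRange_neg_one_eq_nil (by norm_num)
    rw [h0]
    simp only [List.foldl_nil]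
    simpa using h3 0 le_rfl (Nat.zero_le N)
  | succ m ih =>
    intro hm dp hlen h2 h3
    have hmN : m < N := hm
    have hml : m < left.length := by omega
    have hrs_len : (right.take N).length = N := by simp [Nat.min_eq_left hN]
    have hcast : ((m + 1 : Nat) : Int) - 1 = (m : Int) := by push_cast; ring
    have hc : PySem.List.pyRange ((m : Int)) (-1) (-1) = (m : Int) :: PySem.List.pyRange ((m : Int) - 1) (-1) (-1) :=
      PySem.List.pyRange_neg_one_cons (by omega)
    rw [hcast, hc, List.foldl_cons]
    have hrowm : rowsOf right N (left.drop m)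
        = rstep (left.getD m 0) (rowsOf right N (left.drop (m + 1))) (right.take N) := by
      rw [drop_eq_getD_cons left m 0 hml]
      rfl
    have hdropT : (rstep (left.getD m 0) (rowsOf right N (left.drop (m + 1))) (right.take N)).drop N = [0] := by
      have h := rstep_drop_length (left.getD m 0) (rowsOf right N (left.drop (m + 1))) (right.take N)
      rwa [hrs_len] at h
    have hin := a_inner left right N hNl hN m hmN (rowsOf right N (left.drop (m + 1))) N le_rfl dp hlen
      (h3 (m + 1) le_rfl (by omega))
      (by rw [h2 m (by omega), List.replicate_succ', hdropT])
    obtain ⟨hres1, hres2, hres3⟩ := hin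
    refine ih (by omega) _ (hres3.trans hlen) ?_ ?_
    · intro k hk
      rw [hres2 k (by omega)]
      exact h2 k (by omega)
    · intro k hk1 hk2
      rcases Nat.eq_or_lt_of_le hk1 with hkm | hkm
      · subst hkm
        exact hres1.trans hrowm.symm
      · rw [hres2 k (by omega)]
        exact h3 k (by omega) hk2

theorem a_eq (left right : List Int) (h : Pre_solution left right) :
    solution left right = (rowsOf right left.length left).getD 0 0 := by
  have hdef : solution left right
      = PySem.List.pyGetD (PySem.List.pyGetD
          ((PySem.List.pyRange ((left.length : Int) - 1) (-1) (-1)).foldl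
            (fun dp i => (PySem.List.pyRange ((left.length : Int) - 1) (-1) (-1)).foldl
              (fun dp j => aBody left right dp i j) dp)
            ((PySem.List.pyRange 0 ((left.length : Int) + 1) 1).map
              (fun _ => List.replicate (left.length + 1) (0 : Int)))) 0 []) 0 0 := rfl
  rw [hdef]
  have hr : (PySem.List.pyRange 0 ((left.length : Int) + 1) 1).length = left.length + 1 := by
    simp [PySem.List.length_pyRange_one]
  have hlen0 : ((PySem.List.pyRange 0 ((left.length : Int) + 1) 1).map
      (fun _ => List.replicate (left.length + 1) (0 : Int))).length = left.length + 1 := by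
    simp [PySem.List.length_pyRange_one]
  have hconst : ∀ k : Nat, k ≤ left.length →
      ((PySem.List.pyRange 0 ((left.length : Int) + 1) 1).map
        (fun _ => List.replicate (left.length + 1) (0 : Int))).getD k []
      = List.replicate (left.length + 1) 0 := by
    intro k hk
    rw [List.map_const']
    exact List.getD_replicate _ (by rw [hr]; omega)
  have hout := a_outer left right left.length rfl h left.length le_rfl
    ((PySem.List.pyRange 0 ((left.length : Int) + 1) 1).map
      (fun _ => List.replicate (left.length + 1) (0 : Int)))
    hlen0
    (fun k hk => hconst k (by omega))
    (fun k hk1 hk2 => by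
      have hkN : k = left.length := le_antisymm hk2 hk1
      rw [hkN, hconst left.length le_rfl, List.drop_length]
      rfl)
  rw [PySem.List.pyGetD_zero, PySem.List.pyGetD_zero]
  exact congrArg (fun r => r.getD 0 0) hout

-- ===== B-side lemmas =====

-- index of the first element ≥ v (length if none): the run-end pointer of Source B
def nxt (v : Int) : List Int → Nat
  | [] => 0
  | b :: bs => if b ≥ v then 0 else nxt v bs + 1

theorem nxt_le (v : Int) (bs : List Int) : nxt v bs ≤ bs.length := by
  induction bs with
  | nil => simp [nxt]
  | cons b bs ih =>
    by_cases h : b ≥ v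
    · simp only [nxt, if_pos h, List.length_cons]; omega
    · simp only [nxt, if_neg h, List.length_cons]; omega

-- the true suffix-sum list that Source B's S loop builds
def sList (rs : List Int) : List Int :=
  (List.range (rs.length + 1)).map (fun j => (rs.drop j).sum)

theorem sList_length (rs : List Int) : (sList rs).length = rs.length + 1 := by
  simp [sList]

theorem sList_getD (rs : List Int) (j : Nat) (hj : j ≤ rs.length) :
    (sList rs).getD j 0 = (rs.drop j).sum := by
  rw [List.getD_eq_getElem _ _ (by simp [sList_length]; omega)]
  simp [sList]

-- the invariant of Source B's S loop: processed entries hold the suffix sums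
theorem bS_inner (right : List Int) (N : Nat) (hN : N ≤ right.length) :
    ∀ m : Nat, m ≤ N →
      (PySem.List.pyRange ((m : Int) - 1) (-1) (-1)).foldl (bSBody right)
        (List.replicate m 0 ++ (sList (right.take N)).drop m)
      = sList (right.take N) := by
  intro m
  induction m with
  | zero =>
    rw [PySem.List.pyRange_neg_one_eq_nil (by norm_num)]
    simp
  | succ m ih =>
    intro hm
    have hmN : m < N := hm
    have hmr : m < right.length := Nat.lt_of_lt_of_le hmN hN
    have hrsl : (right.take N).length = N := by simp [Nat.min_eq_left hN]
    have hcast : ((m + 1 : Nat) : Int) - 1 = (m : Int) := by push_cast; ring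
    rw [hcast, PySem.List.pyRange_neg_one_cons (by omega), List.foldl_cons]
    have hrs : (right.take N).getD m 0 = right.getD m 0 := by
      rw [List.getD_eq_getElem _ _ (by omega : m < (right.take N).length),
        List.getD_eq_getElem _ _ hmr]
      simp
    have hstep : bSBody right (List.replicate (m + 1) 0 ++ (sList (right.take N)).drop (m + 1)) (m : Int)
        = List.replicate m 0 ++ (sList (right.take N)).drop m := by
      rw [bSBody]
      rw [show ((m : Int) + 1) = ((m + 1 : Nat) : Int) by push_cast; ring]
      simp only [PySem.List.pyGetD_natCast, PySem.List.pySetD_natCast]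
      have hget : (List.replicate (m + 1) (0 : Int) ++ (sList (right.take N)).drop (m + 1)).getD (m + 1) 0
          = ((right.take N).drop (m + 1)).sum := by
        rw [List.getD_append_right (List.replicate (m + 1) (0 : Int)) _ _ (m + 1) (by simp)]
        simp only [List.length_replicate, Nat.sub_self]
        rw [getD_drop, Nat.add_zero, sList_getD _ _ (by omega)]
      have hval : ((right.take N).drop (m + 1)).sum + right.getD m 0
          = (sList (right.take N)).getD m 0 := by
        rw [sList_getD _ _ (by omega), drop_eq_getD_cons (right.take N) m 0 (by omega), hrs]
        simp
        ring
      rw [hget, hval]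
      exact set_replicate_drop (sList (right.take N)) m (by rw [sList_length]; omega)
    rw [hstep]
    exact ih (by omega)

-- Source B's S loop computes sList (right.take N)
theorem bS_eq (left right : List Int) (h : Pre_solution left right) :
    bS left right = sList (right.take left.length) := by
  have hstart : List.replicate (left.length + 1) (0 : Int)
      = List.replicate left.length 0 ++ (sList (right.take left.length)).drop left.length := by
    have hrsl : (right.take left.length).length = left.length := by
      simp [Nat.min_eq_left h]
    have hd : (sList (right.take left.length)).drop left.length = [0] := by
      have hl := sList_length (right.take left.length)
      rw [hrsl] at hl
      apply List.ext_getElem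
      · simp [hl]
      · intro i h1 h2
        simp [hl] at h1
        subst h1
        have : (sList (right.take left.length)).getD left.length 0 = 0 := by
          rw [sList_getD _ _ (by omega), List.drop_eq_nil_of_le (le_of_eq hrsl)]
          rfl
        simp at h2
        rw [List.getElem_drop]
        rw [← List.getD_eq_getElem _ (0:Int) (by omega)]
        simpa using this
    rw [hd, List.replicate_succ']
  rw [bS, hstart]
  exact bS_inner right left.length h left.length le_rfl

-- closed form for the rstep row: entry j = run sum + best of prev at the run's end
theorem rstep_formula (v : Int) (prev rs : List Int) (n : Nat) (j : Nat)
    (hj : j + n = rs.length) :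
    (rstep v prev rs).getD j 0 =
      (rs.drop j).sum - (rs.drop (j + nxt v (rs.drop j))).sum +
        (if j + nxt v (rs.drop j) = rs.length then 0
         else max (prev.getD (j + nxt v (rs.drop j)) 0)
                  (prev.getD (j + nxt v (rs.drop j) + 1) 0)) := by
  induction n generalizing j with
  | zero =>
    have hjl : j = rs.length := by omega
    subst hjl
    have h0 : (rstep v prev rs).getD rs.length 0 = 0 := by
      have hd := rstep_drop_length v prev rs
      have := getD_drop (rstep v prev rs) rs.length 0 (0 : Int)
      rw [hd] at this
      simpa using this.symm
    have hnxt : nxt v (rs.drop rs.length) = 0 := by rw [List.drop_length]; rfl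
    rw [hnxt, Nat.add_zero, if_pos rfl, h0]
    ring
  | succ n ih =>
    have hjlt : j < rs.length := by omega
    have hcons : rs.drop j = rs.getD j 0 :: rs.drop (j + 1) := drop_eq_getD_cons rs j 0 hjlt
    rw [rstep_getD v prev rs j hjlt]
    by_cases hge : rs.getD j 0 ≥ v
    · have hnot : ¬ v > rs.getD j 0 := by omega
      have hnxt : nxt v (rs.drop j) = 0 := by
        rw [hcons]; simp only [nxt, if_pos hge]
      simp only [hnxt, Nat.add_zero]
      rw [if_neg hnot, if_neg (Nat.ne_of_lt hjlt), sub_self, zero_add]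
    · have hgt : v > rs.getD j 0 := by omega
      have hnxt : nxt v (rs.drop j) = nxt v (rs.drop (j + 1)) + 1 := by
        rw [hcons]; simp only [nxt, if_neg hge]
      have hK : j + nxt v (rs.drop j) = (j + 1) + nxt v (rs.drop (j + 1)) := by omega
      have hsum : (rs.drop j).sum = rs.getD j 0 + (rs.drop (j + 1)).sum := by
        rw [hcons]; simp
      rw [if_pos hgt, ih (j + 1) (by omega), hK, hsum]
      ring

-- Source B's inner loop builds the rstep row
theorem b_inner (right prev : List Int) (v : Int) (N : Nat) (hN : N ≤ right.length) :
    ∀ m : Nat, m ≤ N →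
      ((PySem.List.pyRange ((m : Int) - 1) (-1) (-1)).foldl
        (bRowBody right (sList (right.take N)) prev (N : Int) v)
        (((m + nxt v ((right.take N).drop m) : Nat) : Int),
          List.replicate m 0 ++ (rstep v prev (right.take N)).drop m)).2
      = rstep v prev (right.take N) := by
  intro m
  induction m with
  | zero =>
    rw [PySem.List.pyRange_neg_one_eq_nil (by norm_num)]
    simp
  | succ m ih =>
    intro hm
    have hmN : m < N := hm
    have hmr : m < right.length := Nat.lt_of_lt_of_le hmN hN
    have hrsl : (right.take N).length = N := by simp [Nat.min_eq_left hN]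
    have hTlen : (rstep v prev (right.take N)).length = N + 1 := by
      rw [rstep_length, hrsl]
    have hcast : ((m + 1 : Nat) : Int) - 1 = (m : Int) := by push_cast; ring
    rw [hcast, PySem.List.pyRange_neg_one_cons (by omega), List.foldl_cons]
    have hrs : right.getD m 0 = (right.take N).getD m 0 := by
      rw [List.getD_eq_getElem _ _ (by omega : m < (right.take N).length),
        List.getD_eq_getElem _ _ hmr]
      simp
    have hcons : (right.take N).drop m = (right.take N).getD m 0 :: (right.take N).drop (m + 1) :=
      drop_eq_getD_cons (right.take N) m 0 (by omega)
    have hKle : m + nxt v ((right.take N).drop m) ≤ N := by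
      have := nxt_le v ((right.take N).drop m)
      rw [List.length_drop, hrsl] at this
      omega
    have hk : (if PySem.List.pyGetD right (m : Int) 0 ≥ v then (m : Int)
        else ((m + 1 + nxt v ((right.take N).drop (m + 1)) : Nat) : Int))
        = ((m + nxt v ((right.take N).drop m) : Nat) : Int) := by
      simp only [PySem.List.pyGetD_natCast, hrs]
      by_cases hge : (right.take N).getD m 0 ≥ v
      · rw [if_pos hge]
        rw [hcons]
        simp only [nxt, if_pos hge, Nat.add_zero]
      · rw [if_neg hge]
        rw [hcons]
        simp only [nxt, if_neg hge]
        congr 1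
        omega
    have hval : (if ((m + nxt v ((right.take N).drop m) : Nat) : Int) = (N : Int) then
          PySem.List.pyGetD (sList (right.take N)) (m : Int) 0
        else
          PySem.List.pyGetD (sList (right.take N)) (m : Int) 0 -
            PySem.List.pyGetD (sList (right.take N)) ((m + nxt v ((right.take N).drop m) : Nat) : Int) 0 +
            max (PySem.List.pyGetD prev ((m + nxt v ((right.take N).drop m) : Nat) : Int) 0)
                (PySem.List.pyGetD prev (((m + nxt v ((right.take N).drop m) : Nat) : Int) + 1) 0))
        = (rstep v prev (right.take N)).getD m 0 := by
      rw [rstep_formula v prev (right.take N) (N - m) m (by omega)]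
      simp only [PySem.List.pyGetD_natCast, Nat.cast_inj, hrsl]
      rw [sList_getD _ _ (by omega), sList_getD _ _ (by omega)]
      by_cases hKN : m + nxt v ((right.take N).drop m) = N
      · rw [if_pos hKN, if_pos hKN, hKN, List.drop_eq_nil_of_le (le_of_eq hrsl)]
        simp
      · rw [if_neg hKN, if_neg hKN]
        rw [show (((m + nxt v ((right.take N).drop m) : Nat) : Int) + 1)
            = ((m + nxt v ((right.take N).drop m) + 1 : Nat) : Int) by push_cast; ring]
        simp only [PySem.List.pyGetD_natCast]
    have hstep : bRowBody right (sList (right.take N)) prev (N : Int) v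
        (((m + 1 + nxt v ((right.take N).drop (m + 1)) : Nat) : Int),
          List.replicate (m + 1) 0 ++ (rstep v prev (right.take N)).drop (m + 1)) (m : Int)
        = (((m + nxt v ((right.take N).drop m) : Nat) : Int),
          List.replicate m 0 ++ (rstep v prev (right.take N)).drop m) := by
      rw [bRowBody]
      simp only [hk]
      refine Prod.ext rfl ?_
      simp only []
      split_ifs with hKN
      · simp only [PySem.List.pySetD_natCast]
        rw [show PySem.List.pyGetD (sList (right.take N)) (m : Int) 0
              = (rstep v prev (right.take N)).getD m 0 by
            have := hval; rw [if_pos hKN] at this; exact this]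
        exact set_replicate_drop _ m (by omega)
      · simp only [PySem.List.pySetD_natCast]
        rw [show (PySem.List.pyGetD (sList (right.take N)) (m : Int) 0 -
              PySem.List.pyGetD (sList (right.take N)) ((m + nxt v ((right.take N).drop m) : Nat) : Int) 0 +
              max (PySem.List.pyGetD prev ((m + nxt v ((right.take N).drop m) : Nat) : Int) 0)
                  (PySem.List.pyGetD prev (((m + nxt v ((right.take N).drop m) : Nat) : Int) + 1) 0))
              = (rstep v prev (right.take N)).getD m 0 by
            have := hval; rw [if_neg hKN] at this; exact this]
        exact set_replicate_drop _ m (by omega)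
    rw [hstep]
    exact ih (by omega)

theorem b_eq (left right : List Int) (h : Pre_solution left right) :
    solution_alt left right = (rowsOf right left.length left).getD 0 0 := by
  have hrsl : (right.take left.length).length = left.length := by simp [Nat.min_eq_left h]
  have hfold : ∀ l : List Int,
      l.foldr (fun v prev => bRow right (bS left right) prev left.length v)
        (List.replicate (left.length + 1) 0)
      = rowsOf right left.length l := by
    intro l
    induction l with
    | nil => rfl
    | cons v l ihl =>
      rw [List.foldr_cons, ihl]
      show bRow right (bS left right) (rowsOf right left.length l) left.length v
        = rowsOf right left.length (v :: l)
      rw [bRow, bS_eq left right h]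
      have hT : rowsOf right left.length (v :: l)
          = rstep v (rowsOf right left.length l) (right.take left.length) := rfl
      have hnxt0 : nxt v ((right.take left.length).drop left.length) = 0 := by
        rw [List.drop_eq_nil_of_le (le_of_eq hrsl)]; rfl
      have hstart : ((left.length : Int), List.replicate (left.length + 1) (0 : Int))
          = (((left.length + nxt v ((right.take left.length).drop left.length) : Nat) : Int),
            List.replicate left.length 0 ++
              (rstep v (rowsOf right left.length l) (right.take left.length)).drop left.length) := by
        rw [hnxt0]
        have hd : (rstep v (rowsOf right left.length l) (right.take left.length)).drop left.length
            = [0] := by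
          have := rstep_drop_length v (rowsOf right left.length l) (right.take left.length)
          rwa [hrsl] at this
        rw [hd, List.replicate_succ']
        simp
      rw [hT, hstart]
      exact b_inner right (rowsOf right left.length l) v left.length h left.length le_rfl
  have hdef : solution_alt left right
      = PySem.List.pyGetD (left.reverse.foldl
          (fun prev v => bRow right (bS left right) prev left.length v)
          (List.replicate (left.length + 1) (0 : Int))) 0 0 := rfl
  rw [hdef, List.foldl_reverse]
  rw [hfold left, PySem.List.pyGetD_zero]

-- ===== VERDICT (by name: the statement is the Claim_ definition above) =====
theorem solution_spec : Claim_equal_solution := by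
  intro left right _ hpre
  unfold Spec_solution
  rw [a_eq left right hpre, b_eq left right hpre]
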